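-- pv_equiv track=rewrite | github.com/JuliusJauga/Reed-Muller-Decode | ReedMuller/HadamardTransform.py | find_largest_component_position
-- ===== SOURCE A (Python) =====
-- def find_largest_component_position(vector):
--     '''
--     Find the position of the largest component in a vector.
--
--     Args:
--         vector: The vector to search.
--
--     Returns:
--         The position of the largest component and its sign.
--     '''
--     max_value = abs(vector[0])
--     position = 0
--     sign = 1 if vector[0] > 0 else -1
--     for i in range(1, len(vector)):
--         if abs(vector[i]) > max_value:
--             max_value = abs(vector[i])
--             sign = 1 if vector[i] > 0 else -1
--             position = i
--     return position, sign
-- ===== SOURCE B (Python) =====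
-- def find_largest_component_position(vector):
--     '''Two-pass re-implementation: first compute the maximum magnitude,
--     then return the first position attaining it together with its sign.'''
--     m = max(abs(x) for x in vector)
--     for i, x in enumerate(vector):
--         if abs(x) == m:
--             return i, (1 if x > 0 else -1)
-- ===== Notes on version B (the rewrite author's own statement) =====
-- stated objective: simpler
-- what changed: A's single fused scan carrying (max_value, position, sign) is split into two plain passes: first compute the maximum magnitude with max(), then return the first index attaining it with its sign.
import Mathlib
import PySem

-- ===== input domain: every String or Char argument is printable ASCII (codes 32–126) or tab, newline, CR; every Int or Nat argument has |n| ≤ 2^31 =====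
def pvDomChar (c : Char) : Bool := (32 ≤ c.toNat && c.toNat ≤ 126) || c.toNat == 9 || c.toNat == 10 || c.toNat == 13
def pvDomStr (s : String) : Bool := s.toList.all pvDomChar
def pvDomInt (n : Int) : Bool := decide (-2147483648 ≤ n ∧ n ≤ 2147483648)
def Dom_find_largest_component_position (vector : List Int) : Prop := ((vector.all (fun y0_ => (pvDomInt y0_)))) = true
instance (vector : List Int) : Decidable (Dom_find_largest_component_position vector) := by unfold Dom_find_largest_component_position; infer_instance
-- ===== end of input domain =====

-- B replaces A's single fused argmax scan by two plain passes (max of magnitudes, then first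
-- position attaining it); objective: simpler decomposition, same O(n) cost.

-- ===== PORT A =====
-- A: one scan keeping (max_value, position, sign), updating on strictly larger magnitude.
def find_largest_component_position (vector : List Int) : Int × Int :=
  match PySem.List.pyGet? vector 0 with
  | none => (0, 1)  -- Python raises IndexError on [] (vector[0]); excluded by Pre_
  | some v0 =>
    let st := (PySem.List.pyRange 1 (vector.length : Int)).foldl
      (fun (st : Int × Int × Int) i =>
        let x := PySem.List.pyGetD vector i 0   -- index always in range inside the loop
        if |x| > st.1 then (|x|, i, if x > 0 then 1 else -1) else st)
      (|v0|, 0, if v0 > 0 then (1 : Int) else -1)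
    st.2

-- ===== PORT B =====
-- B helper: the `for i, x in enumerate(vector): if abs(x) == m: return …` loop.
def pvFirstAttain (m : Int) : List (Int × Int) → Int × Int
  | [] => (0, 1)  -- unreachable in B: m is attained by some element
  | (i, x) :: rest => if |x| = m then (i, if x > 0 then 1 else -1) else pvFirstAttain m rest

def find_largest_component_position_alt (vector : List Int) : Int × Int :=
  match vector with
  | [] => (0, 1)  -- Python raises ValueError on [] (max of empty); excluded by Pre_
  | v0 :: rest =>
    let m := (rest.map (fun x => |x|)).foldl max |v0|   -- max(abs(x) for x in vector)
    pvFirstAttain m (PySem.List.enumerate vector 0)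

-- ===== PRECONDITION & SPEC =====
-- Pre_ excludes only the empty vector, on which both A and B raise (IndexError / ValueError).
def Pre_find_largest_component_position (vector : List Int) : Prop := vector ≠ []
instance (vector : List Int) : Decidable (Pre_find_largest_component_position vector) := by
  unfold Pre_find_largest_component_position; infer_instance

def pvWitness_find_largest_component_position : List Int := [3, -5, 2]

def Spec_find_largest_component_position (vector : List Int) (out : Int × Int) : Prop := out = find_largest_component_position_alt vector
instance (vector : List Int) (out : Int × Int) : Decidable (Spec_find_largest_component_position vector out) := by unfold Spec_find_largest_component_position; infer_instance

-- ===== CLAIM (what is proved, stated in full; the proofs are below) =====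
def Claim_equal_find_largest_component_position : Prop := ∀ (vector : List Int), Dom_find_largest_component_position vector → Pre_find_largest_component_position vector → Spec_find_largest_component_position vector (find_largest_component_position vector)

-- ===== LEMMAS AND PROOFS =====

-- A's loop body, named for the proofs.
def pvStep (st : Int × Int × Int) (i x : Int) : Int × Int × Int :=
  if |x| > st.1 then (|x|, i, if x > 0 then 1 else -1) else st

-- An index loop `for i in range(k, len(v))` reading v[i] is the fold over enumerate (v.drop k) k.
lemma pvFoldRangeEnum {S : Type} (g : S → Int → Int → S) (v : List Int) :
    ∀ (n k : Nat), v.length - k = n → ∀ (init : S),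
      (PySem.List.pyRange (k : Int) (v.length : Int)).foldl
          (fun st i => g st i (PySem.List.pyGetD v i 0)) init
        = (PySem.List.enumerate (v.drop k) (k : Int)).foldl (fun st p => g st p.1 p.2) init := by
  intro n
  induction n with
  | zero =>
      intro k hk init
      have hlen : v.length ≤ k := by omega
      rw [PySem.List.pyRange_one_eq_nil (by exact_mod_cast hlen),
          List.drop_eq_nil_of_le hlen]
      simp [PySem.List.enumerate]
  | succ n ih =>
      intro k hk init
      have hklt : k < v.length := by omega
      rw [PySem.List.pyRange_one_cons (by exact_mod_cast hklt),
          List.drop_eq_getElem_cons hklt, PySem.List.enumerate_cons]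
      simp only [List.foldl_cons, PySem.List.pyGetD_natCast, List.getD_eq_getElem?_getD,
        List.getElem?_eq_getElem hklt, Option.getD_some]
      have h1 : (k : Int) + 1 = ((k + 1 : Nat) : Int) := by push_cast; ring
      rw [h1, ih (k + 1) (by omega)]

lemma pvFoldlMaxOfLe (l : List Int) (a : Int) (h : ∀ x ∈ l, x ≤ a) : l.foldl max a = a := by
  induction l with
  | nil => rfl
  | cons y ys ih =>
      simp only [List.foldl_cons, max_eq_left (h y (by simp))]
      exact ih (fun x hx => h x (by simp [hx]))

-- If nothing in xs beats the running maximum, A's loop keeps its state.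
lemma pvMainEq : ∀ (xs : List Int) (k mv p s : Int), (∀ x ∈ xs, |x| ≤ mv) →
    (PySem.List.enumerate xs k).foldl (fun st q => pvStep st q.1 q.2) (mv, p, s) = (mv, p, s) := by
  intro xs
  induction xs with
  | nil => intro k mv p s _; rfl
  | cons x xs ih =>
      intro k mv p s h
      rw [PySem.List.enumerate_cons, List.foldl_cons]
      have hx : ¬ |x| > mv := by simpa using h x (by simp)
      simp only [pvStep, if_neg hx]
      exact ih (k + 1) mv p s (fun y hy => h y (by simp [hy]))

-- If something in xs beats the running maximum, A's loop ends at the first position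
-- attaining the overall maximum — exactly B's second pass.
lemma pvMainGt : ∀ (xs : List Int) (k mv p s : Int), (∃ x ∈ xs, mv < |x|) →
    ((PySem.List.enumerate xs k).foldl (fun st q => pvStep st q.1 q.2) (mv, p, s)).2
      = pvFirstAttain ((xs.map (fun x => |x|)).foldl max mv) (PySem.List.enumerate xs k) := by
  intro xs
  induction xs with
  | nil => intro k mv p s h; simp at h
  | cons x xs ih =>
      intro k mv p s h
      simp only [PySem.List.enumerate_cons, List.foldl_cons, List.map_cons]
      by_cases hx : |x| > mv
      · have h1 : pvStep (mv, p, s) (k, x).1 (k, x).2 = (|x|, k, if x > 0 then 1 else -1) := by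
          simp [pvStep, hx]
        rw [h1, max_eq_right (le_of_lt hx)]
        by_cases hall : ∀ y ∈ xs, |y| ≤ |x|
        · have hm : (xs.map (fun z => |z|)).foldl max |x| = |x| := by
            apply pvFoldlMaxOfLe
            intro y hy
            obtain ⟨z, hz, rfl⟩ := List.mem_map.mp hy
            exact hall z hz
          rw [pvMainEq xs (k + 1) (|x|) k _ hall, hm]
          simp [pvFirstAttain]
        · push Not at hall
          obtain ⟨y, hy, hgy⟩ := hall
          have hym : |y| ≤ (xs.map (fun z => |z|)).foldl max |x| :=
            (PySem.List.le_foldl_max _ _).2 _ (List.mem_map.mpr ⟨y, hy, rfl⟩)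
          have hne : ¬ |x| = (xs.map (fun z => |z|)).foldl max |x| := by omega
          rw [ih (k + 1) (|x|) k (if x > 0 then 1 else -1) ⟨y, hy, hgy⟩]
          simp [pvFirstAttain, hne]
      · have hxle : |x| ≤ mv := le_of_not_gt hx
        have h1 : pvStep (mv, p, s) (k, x).1 (k, x).2 = (mv, p, s) := by
          simp [pvStep, hx]
        rw [h1, max_eq_left hxle]
        obtain ⟨y, hy, hgy⟩ := h
        have hyxs : y ∈ xs := by
          rcases List.mem_cons.mp hy with rfl | h'
          · omega
          · exact h'
        have hym : |y| ≤ (xs.map (fun z => |z|)).foldl max mv :=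
          (PySem.List.le_foldl_max _ _).2 _ (List.mem_map.mpr ⟨y, hyxs, rfl⟩)
        have hne : ¬ |x| = (xs.map (fun z => |z|)).foldl max mv := by omega
        rw [ih (k + 1) mv p s ⟨y, hyxs, hgy⟩]
        simp [pvFirstAttain, hne]

-- ===== VERDICT (by name: the statement is the Claim_ definition above) =====
theorem find_largest_component_position_spec : Claim_equal_find_largest_component_position := by
  intro vector _ hpre
  unfold Spec_find_largest_component_position
  match vector with
  | [] => exact absurd rfl hpre
  | v0 :: rest =>
    have hget : PySem.List.pyGet? (v0 :: rest) 0 = some v0 := by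
      simp [PySem.List.pyGet?, PySem.List.pyIdx?]
    unfold find_largest_component_position
    rw [hget]
    have hconv := pvFoldRangeEnum pvStep (v0 :: rest) rest.length 1 (by simp)
        (|v0|, 0, if v0 > 0 then (1 : Int) else -1)
    simp only [Nat.cast_one, List.drop_one, List.tail_cons] at hconv
    show (List.foldl (fun (st : Int × Int × Int) i => pvStep st i (PySem.List.pyGetD (v0 :: rest) i 0))
        (|v0|, 0, if v0 > 0 then (1 : Int) else -1) (PySem.List.pyRange 1 (((v0 :: rest).length : Nat) : Int))).2
      = find_largest_component_position_alt (v0 :: rest)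
    rw [hconv,
        show find_largest_component_position_alt (v0 :: rest)
          = pvFirstAttain ((rest.map (fun x => |x|)).foldl max |v0|)
              ((0, v0) :: PySem.List.enumerate rest 1) from by
          simp [find_largest_component_position_alt, PySem.List.enumerate_cons]]
    by_cases hall : ∀ x ∈ rest, |x| ≤ |v0|
    · have hm : (rest.map (fun z => |z|)).foldl max |v0| = |v0| := by
        apply pvFoldlMaxOfLe
        intro y hy
        obtain ⟨z, hz, rfl⟩ := List.mem_map.mp hy
        exact hall z hz
      rw [pvMainEq rest 1 (|v0|) 0 _ hall]
      simp [pvFirstAttain, hm]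
    · push Not at hall
      obtain ⟨y, hy, hgy⟩ := hall
      have hym : |y| ≤ (rest.map (fun z => |z|)).foldl max |v0| :=
        (PySem.List.le_foldl_max _ _).2 _ (List.mem_map.mpr ⟨y, hy, rfl⟩)
      have hne : ¬ |v0| = (rest.map (fun z => |z|)).foldl max |v0| := by omega
      rw [pvMainGt rest 1 (|v0|) 0 _ ⟨y, hy, hgy⟩]
      simp [pvFirstAttain, hne]
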